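-- pv_equiv track=rewrite | github.com/pterodactylogan/bufia | eval_dual.py | get_d
-- ===== SOURCE A (Python) =====
-- def get_d(constraint):
--     bundles = constraint.strip("[").strip("]").split("][")
--     num_feats = 0
--     for bundle in bundles:
--         if bundle == "":
--             continue
--         num_feats += len(bundle.split(","))
--
--     return len(bundles) + num_feats
-- ===== SOURCE B (Python) =====
-- def get_d(constraint):
--     # One manual left-to-right character scan with index pointers: trim the ends,
--     # then count separators, commas and nonempty bundles in a single state-machine pass.
--     lo, hi = 0, len(constraint)
--     while lo < hi and constraint[lo] == '[':
--         lo += 1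
--     while hi > lo and constraint[hi - 1] == '[':
--         hi -= 1
--     while lo < hi and constraint[lo] == ']':
--         lo += 1
--     while hi > lo and constraint[hi - 1] == ']':
--         hi -= 1
--     parts, commas, nonempty = 1, 0, 0
--     cur = False
--     i = lo
--     while i < hi:
--         if constraint[i] == ']' and i + 1 < hi and constraint[i + 1] == '[':
--             parts += 1
--             if cur:
--                 nonempty += 1
--             cur = False
--             i += 2
--         else:
--             if constraint[i] == ',':
--                 commas += 1
--             cur = True
--             i += 1
--     if cur:
--         nonempty += 1
--     return parts + commas + nonempty
-- ===== Notes on version B (the rewrite author's own statement) =====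
-- stated objective: alternative
-- what changed: A builds intermediate lists by stripping the bracket characters and splitting on the two-character bundle separator plus an inner comma split per bundle; B never splits at all: it trims the ends with index pointers and makes one manual state-machine scan with a two-character lookahead, counting separators, commas and nonempty bundles in a single pass.
import Mathlib
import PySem

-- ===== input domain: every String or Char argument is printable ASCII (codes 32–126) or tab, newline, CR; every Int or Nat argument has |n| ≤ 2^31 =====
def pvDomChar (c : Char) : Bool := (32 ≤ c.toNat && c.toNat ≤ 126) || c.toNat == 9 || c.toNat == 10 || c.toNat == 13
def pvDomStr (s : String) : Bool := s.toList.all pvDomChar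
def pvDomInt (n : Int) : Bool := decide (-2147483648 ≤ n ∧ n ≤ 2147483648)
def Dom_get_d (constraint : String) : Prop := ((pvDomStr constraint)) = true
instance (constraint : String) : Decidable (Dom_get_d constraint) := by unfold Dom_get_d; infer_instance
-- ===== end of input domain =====

-- B replaces A's strip/split pipeline by one manual index scan: trim the ends
-- with pointer loops, then a single state-machine pass counting separators, commas and
-- nonempty bundles (alternative decomposition, same result).

-- ===== PORT A =====
def get_d (constraint : String) : Int :=
  let bundles :=
    PySem.Chars.splitOn
      (PySem.Chars.stripChars (PySem.Chars.stripChars constraint.toList ['[']) [']'])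
      [']', '[']
  let num_feats : Int :=
    bundles.foldl
      (fun acc bundle =>
        if bundle = [] then acc
        else acc + ((PySem.Chars.splitOn bundle [',']).length : Int)) 0
  (bundles.length : Int) + num_feats

-- ===== PORT B =====
-- B's pointer trim loops: drop c from the front, then from the back (via reverse).
def trimB (l : List Char) (c : Char) : List Char :=
  ((l.dropWhile (· == c)).reverse.dropWhile (· == c)).reverse

-- B's while loop: state (parts, commas, nonempty, cur) with a two-char lookahead for "][" .
def loopB : List Char → Int → Int → Int → Bool → Int
  | [], parts, commas, nonempty, cur =>
      parts + commas + (if cur then nonempty + 1 else nonempty)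
  | [c], parts, commas, nonempty, _ =>
      loopB [] parts (commas + if c = ',' then 1 else 0) nonempty true
  | c1 :: c2 :: rest, parts, commas, nonempty, cur =>
      if c1 = ']' ∧ c2 = '[' then
        loopB rest (parts + 1) commas (if cur then nonempty + 1 else nonempty) false
      else
        loopB (c2 :: rest) parts (commas + if c1 = ',' then 1 else 0) nonempty true

def get_d_alt (constraint : String) : Int :=
  loopB (trimB (trimB constraint.toList '[') ']') 1 0 0 false

-- ===== PRECONDITION & SPEC =====
def Spec_get_d (constraint : String) (out : Int) : Prop := out = get_d_alt constraint
instance (constraint : String) (out : Int) : Decidable (Spec_get_d constraint out) := by unfold Spec_get_d; infer_instance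

-- ===== CLAIM (what is proved, stated in full; the proofs are below) =====
def Claim_equal_get_d : Prop := ∀ (constraint : String), Dom_get_d constraint → Spec_get_d constraint (get_d constraint)

-- ===== LEMMAS AND PROOFS =====

theorem trimB_eq_stripChars (l : List Char) (c : Char) :
    trimB l c = PySem.Chars.stripChars l [c] := by
  have h : (fun x : Char => x == c) = (fun x => [c].contains x) := by
    funext x; by_cases hx : x = c <;> simp [hx]
  simp only [trimB, h]
  rfl

/-- Pure (fuel-indexed) model of `PySem.Chars.splitOn.go`. -/
def spGo (sep : List Char) : Nat → List Char → List (List Char)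
  | 0, l => [l]
  | _ + 1, [] => [[]]
  | fuel + 1, c :: rest =>
      if sep.isPrefixOf (c :: rest) then
        [] :: spGo sep fuel ((c :: rest).drop sep.length)
      else (spGo sep fuel rest).modifyHead (c :: ·)

theorem spGo_ne_nil (sep : List Char) (fuel : Nat) (l : List Char) : spGo sep fuel l ≠ [] := by
  match fuel, l with
  | 0, l => simp [spGo]
  | fuel + 1, [] => simp [spGo]
  | fuel + 1, c :: rest =>
      simp only [spGo]
      split
      · simp
      · cases h : spGo sep fuel rest with
        | nil => exact absurd h (spGo_ne_nil sep fuel rest)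
        | cons a t => simp

theorem splitOn_go_eq (sep : List Char) :
    ∀ (fuel : Nat) (l cur : List Char) (acc : List (List Char)),
      PySem.Chars.splitOn.go sep fuel l cur acc
        = acc.reverse ++ (spGo sep fuel l).modifyHead (fun h => cur.reverse ++ h) := by
  intro fuel
  induction fuel with
  | zero => intro l cur acc; simp [PySem.Chars.splitOn.go, spGo]
  | succ fuel ih =>
      intro l cur acc
      cases l with
      | nil => simp [PySem.Chars.splitOn.go, spGo]
      | cons c rest =>
          by_cases hp : sep.isPrefixOf (c :: rest)
          · rw [show PySem.Chars.splitOn.go sep (fuel+1) (c :: rest) cur acc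
                  = PySem.Chars.splitOn.go sep fuel ((c :: rest).drop sep.length) []
                      (cur.reverse :: acc) by
                simp [PySem.Chars.splitOn.go, hp]]
            rw [ih]
            simp [spGo, hp]
            cases h : spGo sep fuel ((c :: rest).drop sep.length) with
            | nil => exact absurd h (spGo_ne_nil _ _ _)
            | cons a t => simp
          · rw [show PySem.Chars.splitOn.go sep (fuel+1) (c :: rest) cur acc
                  = PySem.Chars.splitOn.go sep fuel rest (c :: cur) acc by
                simp [PySem.Chars.splitOn.go, hp]]
            rw [ih]
            simp only [spGo, hp, if_neg, Bool.false_eq_true, not_false_iff]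
            cases h : spGo sep fuel rest with
            | nil => exact absurd h (spGo_ne_nil _ _ _)
            | cons a t => simp

theorem splitOn_eq_spGo (l sep : List Char) :
    PySem.Chars.splitOn l sep = spGo sep (l.length + 1) l := by
  rw [PySem.Chars.splitOn, splitOn_go_eq]
  cases h : spGo sep (l.length + 1) l with
  | nil => exact absurd h (spGo_ne_nil _ _ _)
  | cons a t => simp

theorem len_spGo_comma : ∀ (fuel : Nat) (l : List Char), l.length ≤ fuel →
    (spGo [','] fuel l).length = l.count ',' + 1 := by
  intro fuel
  induction fuel with
  | zero => intro l hl; interval_cases h : l.length <;> simp_all [List.length_eq_zero_iff, spGo]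
  | succ fuel ih =>
      intro l hl
      cases l with
      | nil => simp [spGo]
      | cons c rest =>
          by_cases hc : c = ','
          · subst hc
            simp [spGo, List.isPrefixOf, ih rest (by simpa using Nat.lt_succ_iff.mp hl),
              List.count_cons]
          · have hc' : ¬ (',' = c) := fun h => hc h.symm
            simp [spGo, List.isPrefixOf, hc', List.count_cons, hc,
              ih rest (by simpa using Nat.lt_succ_iff.mp hl)]

theorem splitOn_comma_length (b : List Char) :
    (PySem.Chars.splitOn b [',']).length = b.count ',' + 1 := by
  rw [splitOn_eq_spGo]
  exact len_spGo_comma _ _ (Nat.le_succ _)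

/-- A's foldl over bundles, in closed form. -/
theorem foldl_feats : ∀ (bs : List (List Char)) (a : Int),
    bs.foldl
      (fun acc bundle =>
        if bundle = [] then acc
        else acc + ((PySem.Chars.splitOn bundle [',']).length : Int)) a
      = a + ((bs.map (fun b => b.count ',')).sum : Nat)
          + (bs.countP (fun b => decide (b ≠ [])) : Int) := by
  intro bs
  induction bs with
  | nil => intro a; simp
  | cons b t ih =>
      intro a
      by_cases hb : b = []
      · subst hb
        simp [List.foldl_cons, ih, List.countP_cons]
      · rw [List.foldl_cons, if_neg hb, ih, splitOn_comma_length]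
        simp only [List.map_cons, List.sum_cons, List.countP_cons, hb, decide_true, ne_eq,
          not_false_iff]
        push_cast
        ring

theorem sum_count_spGo : ∀ (fuel : Nat) (l : List Char),
    ((spGo [']', '['] fuel l).map (fun b => b.count ',')).sum = l.count ',' := by
  intro fuel
  induction fuel with
  | zero => intro l; simp [spGo]
  | succ fuel ih =>
      intro l
      cases l with
      | nil => simp [spGo]
      | cons c rest =>
          cases rest with
          | nil =>
              have : ¬ ([']', '['].isPrefixOf [c]) := by simp [List.isPrefixOf]
              cases fuel <;> simp [spGo, this, List.count_cons]
          | cons c2 r =>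
              by_cases hp : ([']', '['].isPrefixOf (c :: c2 :: r))
              · have hc : ']' = c ∧ '[' = c2 := by
                  simpa [List.isPrefixOf] using hp
                obtain ⟨h1, h2⟩ := hc; cases h1; cases h2
                simp [spGo, hp, ih, List.count_cons]
              · simp only [spGo, hp, if_neg, Bool.false_eq_true, not_false_iff]
                cases h : spGo [']', '['] fuel (c2 :: r) with
                | nil => exact absurd h (spGo_ne_nil _ _ _)
                | cons a t =>
                    have := ih (c2 :: r)
                    rw [h] at this
                    simp [List.count_cons] at this ⊢
                    omega

/-- Nonempty count of the bundle list where the head also counts when `cur` is set. -/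
def Fhead (bs : List (List Char)) (cur : Bool) : Int :=
  match bs with
  | [] => 0
  | b :: t => (if cur ∨ b ≠ [] then 1 else 0) + (t.countP (fun b => decide (b ≠ [])) : Int)

theorem Fhead_false (bs : List (List Char)) (h : bs ≠ []) :
    Fhead bs false = (bs.countP (fun b => decide (b ≠ [])) : Int) := by
  cases bs with
  | nil => exact absurd rfl h
  | cons b t =>
      by_cases hb : b = [] <;> simp [Fhead, hb, List.countP_cons] <;> omega

theorem loopB_spec : ∀ (fuel : Nat) (l : List Char), l.length ≤ fuel →
    ∀ (p c n : Int) (cur : Bool),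
    loopB l p c n cur
      = p + c + n + ((spGo [']', '['] fuel l).length : Int) - 1 + (l.count ',' : Int)
        + Fhead (spGo [']', '['] fuel l) cur := by
  intro fuel
  induction fuel with
  | zero =>
      intro l hl p c n cur
      interval_cases h : l.length
      · rw [List.length_eq_zero_iff.mp h]
        cases cur <;> simp [loopB, spGo, Fhead] <;> ring
  | succ fuel ih =>
      intro l hl p c n cur
      cases l with
      | nil => cases cur <;> simp [loopB, spGo, Fhead] <;> ring
      | cons c1 rest =>
          cases rest with
          | nil =>
              have hnp : ¬ ([']', '['].isPrefixOf [c1]) := by simp [List.isPrefixOf]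
              have h0 : spGo [']', '['] fuel [] = [[]] := by cases fuel <;> simp [spGo]
              simp only [spGo, hnp, if_neg, Bool.false_eq_true, not_false_iff, h0]
              cases cur <;> by_cases hc : c1 = ',' <;>
                simp [loopB, hc, Fhead, List.count_cons, List.modifyHead] <;> ring
          | cons c2 r =>
              by_cases hp : ([']', '['].isPrefixOf (c1 :: c2 :: r))
              · have hc : ']' = c1 ∧ '[' = c2 := by simpa [List.isPrefixOf] using hp
                obtain ⟨h1, h2⟩ := hc; cases h1; cases h2
                have hr : r.length ≤ fuel := by
                  simp at hl; omega
                rw [show loopB (']' :: '[' :: r) p c n cur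
                      = loopB r (p + 1) c (if cur then n + 1 else n) false by
                    simp [loopB]]
                rw [ih r hr]
                have hnn := spGo_ne_nil [']', '['] fuel r
                have hstep : spGo [']', '['] (fuel + 1) (']' :: '[' :: r)
                    = [] :: spGo [']', '['] fuel r := by
                  simp [spGo, hp]
                rw [hstep, Fhead_false _ hnn]
                have hFc : Fhead ([] :: spGo [']', '['] fuel r) cur
                    = (if cur then (1 : Int) else 0)
                      + ((spGo [']', '['] fuel r).countP (fun b => decide (b ≠ [])) : Int) := by
                  cases cur <;> simp [Fhead]
                rw [hFc]
                cases cur <;> simp [List.count_cons] <;> push_cast <;> ring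
              · have hr : (c2 :: r).length ≤ fuel := by simp at hl ⊢; omega
                rw [show loopB (c1 :: c2 :: r) p c n cur
                      = loopB (c2 :: r) p (c + if c1 = ',' then 1 else 0) n true by
                    simp [loopB, hp]
                    intro h1 h2; exact absurd (by simp [List.isPrefixOf, h1, h2]) hp]
                rw [ih (c2 :: r) hr]
                have hnn := spGo_ne_nil [']', '['] fuel (c2 :: r)
                simp only [spGo, hp, if_neg, Bool.false_eq_true, not_false_iff]
                cases hS : spGo [']', '['] fuel (c2 :: r) with
                | nil => exact absurd hS hnn
                | cons b t =>
                    by_cases hc : c1 = ',' <;> cases cur <;>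
                      simp [Fhead, hc, List.count_cons, List.modifyHead] <;> ring

-- ===== VERDICT (by name: the statement is the Claim_ definition above) =====
theorem get_d_spec : Claim_equal_get_d := by
  intro constraint _
  unfold Spec_get_d get_d get_d_alt
  rw [trimB_eq_stripChars, trimB_eq_stripChars]
  set s := PySem.Chars.stripChars (PySem.Chars.stripChars constraint.toList ['[']) [']'] with hs
  have hnn : PySem.Chars.splitOn s [']', '['] ≠ [] := by
    rw [splitOn_eq_spGo]; exact spGo_ne_nil _ _ _
  rw [loopB_spec (s.length + 1) s (Nat.le_succ _), ← splitOn_eq_spGo, Fhead_false _ hnn]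
  simp only [foldl_feats]
  have hsum : (((PySem.Chars.splitOn s [']', '[']).map (fun b => b.count ',')).sum : Nat)
      = s.count ',' := by
    rw [splitOn_eq_spGo]; exact sum_count_spGo _ _
  rw [hsum]
  push_cast
  ring
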